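-- pv_equiv track=rewrite | github.com/wanawin/pbonesapp | pb_ones_filter_app_v2.py | normalize_track
-- ===== SOURCE A (Python) =====
-- ONES_DOMAIN = '0123456789'
--
-- def normalize_track(text: str):
--     toks = []
--     for line in text.splitlines():
--         for token in line.replace(',',' ').split():
--             toks.append(token.strip())
--     normalized, invalid = [], []
--     for tok in toks:
--         digits = [c for c in tok if c.isdigit()]
--         if len(digits) != 5 or any(c not in ONES_DOMAIN for c in digits):
--             invalid.append(tok); continue
--         normalized.append(''.join(sorted(digits)))
--     seen, out = set(), []
--     for n in normalized:
--         if n not in seen: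
--             out.append(n); seen.add(n)
--     return out, invalid
-- ===== SOURCE B (Python) =====
-- def normalize_track(text: str):
--     out, invalid, seen = [], [], set()
--     for line in text.splitlines():
--         for tok in line.replace(',', ' ').split():
--             counts = [0] * 10
--             total = 0
--             for c in tok:
--                 if '0' <= c <= '9':
--                     counts[ord(c) - 48] += 1
--                     total += 1
--             if total != 5:
--                 invalid.append(tok)
--             else:
--                 key = ''.join(chr(48 + d) * counts[d] for d in range(10))
--                 if key not in seen:
--                     seen.add(key)
--                     out.append(key)
--     return out, invalid
-- ===== Notes on version B (the rewrite author's own statement) =====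
-- stated objective: alternative
-- what changed: B fuses A's three sequential passes (tokenize into a list, validate/normalize into a list, dedup) into one streaming pass over tokens, drops the redundant strip() and ONES_DOMAIN re-check, and replaces sorted(digits) by a counting sort over the ten digit counts.
import Mathlib
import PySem

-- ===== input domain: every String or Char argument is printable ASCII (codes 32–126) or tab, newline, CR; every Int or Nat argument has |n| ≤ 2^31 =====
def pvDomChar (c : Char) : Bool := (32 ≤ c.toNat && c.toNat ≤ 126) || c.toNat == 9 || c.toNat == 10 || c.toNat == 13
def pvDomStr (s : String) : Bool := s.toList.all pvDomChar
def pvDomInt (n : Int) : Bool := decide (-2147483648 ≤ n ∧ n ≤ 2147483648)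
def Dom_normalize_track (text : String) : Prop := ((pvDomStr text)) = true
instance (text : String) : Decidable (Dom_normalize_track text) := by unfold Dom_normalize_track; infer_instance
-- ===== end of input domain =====

-- B fuses A's three passes into one streaming pass over the tokens and replaces
-- sorted(digits) by a counting sort over the ten digit counts; equal return value is proved.

-- ===== PORT A =====
-- ONES_DOMAIN = '0123456789'
def pvOnesDomain : String := "0123456789"

-- literal transliteration of A
def normalize_track (text : String) : List String × List String :=
  -- toks = []; for line in text.splitlines(): for token in line.replace(',',' ').split(): toks.append(token.strip())
  let toks : List String :=
    (PySem.Str.splitlines text).foldl (fun toks line =>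
      (PySem.Str.split₀ (PySem.Str.replace line "," " ")).foldl
        (fun toks token => toks ++ [PySem.Str.strip token]) toks) []
  -- normalized, invalid = [], []; for tok in toks: …
  let ni : List String × List String :=
    toks.foldl (fun (p : List String × List String) tok =>
      let digits : List Char := tok.toList.filter (fun c => PySem.Chars.isdigit c)
      if digits.length ≠ 5 ∨ digits.any (fun c => ! PySem.Chars.isIn [c] pvOnesDomain.toList) then
        (p.1, p.2 ++ [tok])
      else
        -- ''.join(sorted(digits))
        (p.1 ++ [String.ofList (PySem.Chars.join []
            ((PySem.List.sorted digits (fun c => c) false).map (fun c => [c])))], p.2))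
      ([], [])
  -- seen, out = set(), []; for n in normalized: if n not in seen: out.append(n); seen.add(n)
  let so : PySem.Set String × List String :=
    ni.1.foldl (fun (q : PySem.Set String × List String) n =>
      if PySem.Set.contains q.1 n then q else (PySem.Set.add q.1 n, q.2 ++ [n])) ([], [])
  (so.2, ni.2)

-- ===== PORT B =====
-- literal transliteration of B (Source B): single fused pass, counting sort of the digits
def normalize_track_alt (text : String) : List String × List String :=
  let st : List String × List String × PySem.Set String :=
    (PySem.Str.splitlines text).foldl (fun st line =>
      (PySem.Str.split₀ (PySem.Str.replace line "," " ")).foldl (fun st tok =>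
        let (out, invalid, seen) := st
        -- counts = [0]*10; total = 0; for c in tok: if '0' <= c <= '9': counts[ord(c)-48] += 1; total += 1
        let ct : List Int × Int :=
          tok.toList.foldl (fun (p : List Int × Int) c =>
            if '0' ≤ c ∧ c ≤ '9' then
              (PySem.List.pySetD p.1 ((c.toNat : Int) - 48)
                 (PySem.List.pyGetD p.1 ((c.toNat : Int) - 48) 0 + 1), p.2 + 1)
            else p) (List.replicate 10 (0 : Int), 0)
        if ct.2 ≠ 5 then (out, invalid ++ [tok], seen)
        else
          -- key = ''.join(chr(48+d)*counts[d] for d in range(10))   (str*int ported by hand as replicate; exact, count here is ≥ 0)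
          let key : String := String.ofList (PySem.Chars.join []
            ((PySem.List.pyRange 0 10 1).map (fun d =>
              List.replicate (PySem.List.pyGetD ct.1 d 0).toNat (Char.ofNat (48 + d.toNat)))))
          if PySem.Set.contains seen key then (out, invalid, seen)
          else (out ++ [key], invalid, PySem.Set.add seen key)) st) ([], [], [])
  (st.1, st.2.1)

-- ===== PRECONDITION & SPEC =====
def Spec_normalize_track (text : String) (out : List String × List String) : Prop := out = normalize_track_alt text
instance (text : String) (out : List String × List String) : Decidable (Spec_normalize_track text out) := by unfold Spec_normalize_track; infer_instance

-- ===== CLAIM (what is proved, stated in full; the proofs are below) =====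
def Claim_equal_normalize_track : Prop := ∀ (text : String), Dom_normalize_track text → Spec_normalize_track text (normalize_track text)

-- ===== LEMMAS AND PROOFS =====
def pvDigits (t : String) : List Char := t.toList.filter PySem.Chars.isdigit
def pvBlocks (cs : List Char) : List Char :=
  List.replicate (cs.count '0') '0' ++ List.replicate (cs.count '1') '1' ++
  List.replicate (cs.count '2') '2' ++ List.replicate (cs.count '3') '3' ++
  List.replicate (cs.count '4') '4' ++ List.replicate (cs.count '5') '5' ++
  List.replicate (cs.count '6') '6' ++ List.replicate (cs.count '7') '7' ++
  List.replicate (cs.count '8') '8' ++ List.replicate (cs.count '9') '9'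
def pvKey (t : String) : String := String.ofList (pvBlocks (pvDigits t))
def pvToks (text : String) : List String :=
  (PySem.Str.splitlines text).flatMap (fun line => PySem.Str.split₀ (PySem.Str.replace line "," " "))
def pvF (t : String) : Option String := if (pvDigits t).length = 5 then some (pvKey t) else none
def pvCore (toks : List String) : List String × List String :=
  (PySem.Set.ofList (toks.filterMap pvF), toks.filter (fun t => decide ((pvDigits t).length ≠ 5)))

-- char facts
lemma pv_char_eq {c c' : Char} (h : c.toNat = c'.toNat) : c = c' :=
  Char.ext (UInt32.toNat_inj.mp h)

lemma pv_isdigit_bounds {c : Char} (h : PySem.Chars.isdigit c = true) :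
    48 ≤ c.toNat ∧ c.toNat ≤ 57 := by
  unfold PySem.Chars.isdigit at h
  rw [Bool.and_eq_true, decide_eq_true_iff, decide_eq_true_iff] at h
  obtain ⟨h1, h2⟩ := h
  rw [Char.le_def, UInt32.le_iff_toNat_le] at h1 h2
  exact ⟨h1, h2⟩

lemma pv_toNat_ofNat {n : Nat} (h2 : n ≤ 57) : (Char.ofNat n).toNat = n := by
  unfold Char.ofNat
  split
  · rfl
  · rename_i hv; exfalso; exact hv (Or.inl (by omega))

lemma pv_digit_cases {c : Char} (h : PySem.Chars.isdigit c = true) :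
    c = '0' ∨ c = '1' ∨ c = '2' ∨ c = '3' ∨ c = '4' ∨ c = '5' ∨ c = '6' ∨ c = '7' ∨ c = '8' ∨ c = '9' := by
  obtain ⟨h1, h2⟩ := pv_isdigit_bounds h
  have : c.toNat = 48 ∨ c.toNat = 49 ∨ c.toNat = 50 ∨ c.toNat = 51 ∨ c.toNat = 52 ∨
      c.toNat = 53 ∨ c.toNat = 54 ∨ c.toNat = 55 ∨ c.toNat = 56 ∨ c.toNat = 57 := by omega
  rcases this with h|h|h|h|h|h|h|h|h|h <;>
    [exact Or.inl (pv_char_eq h);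
     exact Or.inr (Or.inl (pv_char_eq h));
     exact Or.inr (Or.inr (Or.inl (pv_char_eq h)));
     exact Or.inr (Or.inr (Or.inr (Or.inl (pv_char_eq h))));
     exact Or.inr (Or.inr (Or.inr (Or.inr (Or.inl (pv_char_eq h)))));
     exact Or.inr (Or.inr (Or.inr (Or.inr (Or.inr (Or.inl (pv_char_eq h))))));
     exact Or.inr (Or.inr (Or.inr (Or.inr (Or.inr (Or.inr (Or.inl (pv_char_eq h)))))));
     exact Or.inr (Or.inr (Or.inr (Or.inr (Or.inr (Or.inr (Or.inr (Or.inl (pv_char_eq h))))))));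
     exact Or.inr (Or.inr (Or.inr (Or.inr (Or.inr (Or.inr (Or.inr (Or.inr (Or.inl (pv_char_eq h)))))))));
     exact Or.inr (Or.inr (Or.inr (Or.inr (Or.inr (Or.inr (Or.inr (Or.inr (Or.inr (pv_char_eq h)))))))))]

lemma pv_digit_isIn {c : Char} (h : PySem.Chars.isdigit c = true) :
    PySem.Chars.isIn [c] pvOnesDomain.toList = true := by
  rcases pv_digit_cases h with h|h|h|h|h|h|h|h|h|h <;> subst h <;> decide

-- pvBlocks is a permutation of an all-digit list
lemma pv_blocks_perm {cs : List Char} (h : ∀ c ∈ cs, PySem.Chars.isdigit c = true) :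
    (pvBlocks cs).Perm cs := by
  rw [List.perm_iff_count]
  intro a
  by_cases ha : PySem.Chars.isdigit a = true
  · rcases pv_digit_cases ha with h'|h'|h'|h'|h'|h'|h'|h'|h'|h' <;> subst h' <;>
      simp [pvBlocks, List.count_append, List.count_replicate]
  · have hnotmem : a ∉ cs := fun hm => ha (h a hm)
    rw [List.count_eq_zero.mpr hnotmem]
    have f : ∀ c : Char, PySem.Chars.isdigit c = true → ¬ (c == a) = true := by
      intro c hc he; exact ha (by rwa [beq_iff_eq.mp he] at hc)
    simp only [pvBlocks, List.count_append, List.count_replicate]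
    rw [if_neg (f '0' (by decide)), if_neg (f '1' (by decide)), if_neg (f '2' (by decide)),
        if_neg (f '3' (by decide)), if_neg (f '4' (by decide)), if_neg (f '5' (by decide)),
        if_neg (f '6' (by decide)), if_neg (f '7' (by decide)), if_neg (f '8' (by decide)),
        if_neg (f '9' (by decide))]

lemma pv_step_pairwise (c : Char) (n : Nat) (l : List Char)
    (hp : l.Pairwise (· ≤ ·)) (hm : ∀ b ∈ l, c ≤ b) :
    (List.replicate n c ++ l).Pairwise (· ≤ ·) ∧ ∀ b ∈ List.replicate n c ++ l, c ≤ b := by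
  constructor
  · rw [List.pairwise_append]
    refine ⟨List.pairwise_replicate.mpr (Or.inr le_rfl), hp, ?_⟩
    intro a ha b hb
    rw [List.eq_of_mem_replicate ha]
    exact hm b hb
  · intro b hb
    rcases List.mem_append.mp hb with hb | hb
    · rw [List.eq_of_mem_replicate hb]
    · exact hm b hb

lemma pv_blocks_pairwise (cs : List Char) : (pvBlocks cs).Pairwise (· ≤ ·) := by
  unfold pvBlocks
  simp only [List.append_assoc]
  have s9 := pv_step_pairwise '9' (cs.count '9') [] List.Pairwise.nil (by simp)
  have s8 := pv_step_pairwise '8' (cs.count '8') _ s9.1 (fun b hb => le_trans (by decide) (s9.2 b hb))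
  have s7 := pv_step_pairwise '7' (cs.count '7') _ s8.1 (fun b hb => le_trans (by decide) (s8.2 b hb))
  have s6 := pv_step_pairwise '6' (cs.count '6') _ s7.1 (fun b hb => le_trans (by decide) (s7.2 b hb))
  have s5 := pv_step_pairwise '5' (cs.count '5') _ s6.1 (fun b hb => le_trans (by decide) (s6.2 b hb))
  have s4 := pv_step_pairwise '4' (cs.count '4') _ s5.1 (fun b hb => le_trans (by decide) (s5.2 b hb))
  have s3 := pv_step_pairwise '3' (cs.count '3') _ s4.1 (fun b hb => le_trans (by decide) (s4.2 b hb))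
  have s2 := pv_step_pairwise '2' (cs.count '2') _ s3.1 (fun b hb => le_trans (by decide) (s3.2 b hb))
  have s1 := pv_step_pairwise '1' (cs.count '1') _ s2.1 (fun b hb => le_trans (by decide) (s2.2 b hb))
  have s0 := pv_step_pairwise '0' (cs.count '0') _ s1.1 (fun b hb => le_trans (by decide) (s1.2 b hb))
  simpa using s0.1

-- hence A's per-token key: sorted digits = pvBlocks
lemma pv_sorted_eq_blocks {cs : List Char} (h : ∀ c ∈ cs, PySem.Chars.isdigit c = true) :
    PySem.List.sorted cs (fun c => c) false = pvBlocks cs :=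
  PySem.List.sorted_id_eq_of_perm_of_pairwise cs (pvBlocks cs) (pv_blocks_perm h) (pv_blocks_pairwise cs)

-- tokens produced by split() contain no whitespace, so strip() is a no-op on them
lemma pv_split0_go_nospace : ∀ (s cur : List Char) (acc : List (List Char)) (hcur : ∀ c ∈ cur, PySem.Chars.isspace c = false)
    (hacc : ∀ t ∈ acc, ∀ c ∈ t, PySem.Chars.isspace c = false)
    (t : List Char), t ∈ PySem.Chars.split₀.go s cur acc → ∀ c ∈ t, PySem.Chars.isspace c = false := by
  intro s
  induction s with
  | nil =>
    intro cur acc hcur hacc t ht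
    unfold PySem.Chars.split₀.go at ht
    split at ht
    · exact hacc t (List.mem_reverse.mp ht)
    · rcases List.mem_cons.mp (List.mem_reverse.mp ht) with h | h
      · intro c hc; exact hcur c (List.mem_reverse.mp (h ▸ hc))
      · exact hacc t h
  | cons c rest ih =>
    intro cur acc hcur hacc t ht
    unfold PySem.Chars.split₀.go at ht
    split at ht
    · split at ht
      · exact ih [] acc (by simp) hacc t ht
      · refine ih [] (cur.reverse :: acc) (by simp) ?_ t ht
        intro u hu
        rcases List.mem_cons.mp hu with h | h
        · intro d hd; exact hcur d (List.mem_reverse.mp (h ▸ hd))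
        · exact hacc u h
    · rename_i hsp
      refine ih (c :: cur) acc ?_ hacc t ht
      intro d hd
      rcases List.mem_cons.mp hd with h | hd
      · subst h; exact Bool.not_eq_true _ ▸ hsp
      · exact hcur d hd

lemma pv_split0_nospace {s t : List Char} (ht : t ∈ PySem.Chars.split₀ s) :
    ∀ c ∈ t, PySem.Chars.isspace c = false :=
  pv_split0_go_nospace s [] [] (by simp) (by simp) t ht

lemma pv_strip_noop {t : List Char} (h : ∀ c ∈ t, PySem.Chars.isspace c = false) :
    PySem.Chars.strip t = t := by
  unfold PySem.Chars.strip PySem.Chars.lstrip PySem.Chars.rstrip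
  have h1 : t.dropWhile PySem.Chars.isspace = t := by
    cases t with
    | nil => rfl
    | cons c t' => rw [List.dropWhile_cons_of_neg (by simp [h c (by simp)])]
  rw [h1]
  cases hrev : t.reverse with
  | nil => simpa using congrArg List.reverse hrev
  | cons c t' =>
    have hc : c ∈ t := List.mem_reverse.mp (hrev ▸ List.mem_cons_self ..)
    rw [List.dropWhile_cons_of_neg (by simp [h c hc]), ← hrev, List.reverse_reverse]

lemma pv_str_strip_noop {s tok : String} (h : tok ∈ PySem.Str.split₀ s) :
    PySem.Str.strip tok = tok := by
  have : tok.toList ∈ PySem.Chars.split₀ s.toList := by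
    rw [← PySem.Str.split₀_map_toList]
    exact List.mem_map_of_mem h
  exact String.toList_inj.mp
    ((PySem.Str.toList_strip tok).trans (pv_strip_noop (pv_split0_nospace this)))

-- generic fold shapes
lemma pv_foldl_nested {α β σ : Type} (g : α → List β) (f : σ → β → σ) :
    ∀ (ls : List α) (init : σ),
      ls.foldl (fun st x => (g x).foldl f st) init = (ls.flatMap g).foldl f init := by
  intro ls
  induction ls with
  | nil => intro init; rfl
  | cons x ls ih => intro init; rw [List.foldl_cons, List.flatMap_cons, List.foldl_append, ih]

-- A's classification loop
lemma pv_classify_fold {P : String → Prop} [DecidablePred P] (g : String → String) :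
    ∀ (toks : List String) (n i : List String),
      toks.foldl (fun (p : List String × List String) tok =>
        if P tok then (p.1, p.2 ++ [tok]) else (p.1 ++ [g tok], p.2)) (n, i)
      = (n ++ (toks.filter (fun t => decide (¬ P t))).map g, i ++ toks.filter (fun t => decide (P t))) := by
  intro toks
  induction toks with
  | nil => intro n i; simp
  | cons t toks ih =>
    intro n i
    rw [List.foldl_cons]
    by_cases h : P t
    · rw [if_pos h, ih, List.filter_cons, List.filter_cons]
      simp [h]
    · rw [if_neg h, ih, List.filter_cons, List.filter_cons]
      simp [h]

-- A's dedup loop: seen and out stay the same list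
lemma pv_dedup_fold :
    ∀ (l : List String) (s : PySem.Set String),
      l.foldl (fun (q : PySem.Set String × List String) n =>
        if PySem.Set.contains q.1 n then q else (PySem.Set.add q.1 n, q.2 ++ [n])) (s, s)
      = (l.foldl PySem.Set.add s, l.foldl PySem.Set.add s) := by
  intro l
  induction l with
  | nil => intro s; rfl
  | cons n l ih =>
    intro s
    rw [List.foldl_cons, List.foldl_cons]
    by_cases h : PySem.Set.contains s n = true
    · have hadd : PySem.Set.add s n = s := by unfold PySem.Set.add; rw [if_pos h]
      rw [if_pos h, hadd]
      exact ih s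
    · have hadd : PySem.Set.add s n = s ++ [n] := by
        unfold PySem.Set.add; rw [if_neg h]
      rw [if_neg h, ← hadd]
      exact ih (PySem.Set.add s n)

lemma pv_digit_iff (c : Char) : ('0' ≤ c ∧ c ≤ '9') ↔ PySem.Chars.isdigit c = true := by
  unfold PySem.Chars.isdigit
  rw [Bool.and_eq_true, decide_eq_true_iff, decide_eq_true_iff]

lemma pv_count_fold : ∀ (cs : List Char) (counts : List Int) (total : Int),
    counts.length = 10 →
    cs.foldl (fun (p : List Int × Int) c =>
        if '0' ≤ c ∧ c ≤ '9' then
          (PySem.List.pySetD p.1 ((c.toNat : Int) - 48)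
             (PySem.List.pyGetD p.1 ((c.toNat : Int) - 48) 0 + 1), p.2 + 1)
        else p) (counts, total)
    = ((List.range 10).map (fun (d : Nat) => PySem.List.pyGetD counts (d : Int) 0
          + (((cs.filter PySem.Chars.isdigit).count (Char.ofNat (48 + d)) : Nat) : Int)),
       total + ((cs.filter PySem.Chars.isdigit).length : Int)) := by
  intro cs
  induction cs with
  | nil =>
    intro counts total hlen
    simp only [List.foldl_nil, List.filter_nil, List.count_nil, List.length_nil]
    refine Prod.ext ?_ (by simp)
    apply List.ext_getElem (by simp [hlen])
    intro i h1 h2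
    simp [PySem.List.pyGetD_natCast, List.getD_eq_getElem?_getD,
      (by simpa [hlen] using h2 : i < counts.length)]
  | cons c cs ih =>
    intro counts total hlen
    rw [List.foldl_cons]
    by_cases hd : PySem.Chars.isdigit c = true
    · rw [if_pos ((pv_digit_iff c).mpr hd)]
      obtain ⟨hb1, hb2⟩ := pv_isdigit_bounds hd
      have hm : ((c.toNat : Int) - 48) = ((c.toNat - 48 : Nat) : Int) := by push_cast [hb1]; ring
      rw [ih _ _ (by rw [PySem.List.length_pySetD, hlen])]
      rw [List.filter_cons_of_pos hd]
      refine Prod.ext ?_ ?_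
      · dsimp only
        apply List.map_congr_left
        intro d hdm
        have hd10 : d < 10 := List.mem_range.mp hdm
        have hidx : c.toNat - 48 < counts.length := by omega
        rw [hm, PySem.List.pyGetD_pySetD_natCast counts _ d _ _ hidx]
        have hceq : (Char.ofNat (48 + d) = c) ↔ d = c.toNat - 48 := by
          constructor
          · intro he
            have := congrArg Char.toNat he
            rw [pv_toNat_ofNat (by omega)] at this
            omega
          · intro he
            exact (pv_char_eq (by rw [pv_toNat_ofNat (by omega)]; omega)).symm
        rw [List.count_cons]
        by_cases he : d = c.toNat - 48
        · rw [if_pos he, if_pos (beq_iff_eq.mpr (hceq.mpr he).symm), he]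
          push_cast
          ring
        · rw [if_neg he, if_neg (by
            intro hb
            exact he (hceq.mp (beq_iff_eq.mp hb).symm))]
          push_cast
          ring
      · dsimp only
        simp only [List.length_cons]
        push_cast
        ring
    · rw [if_neg (fun hp => hd ((pv_digit_iff c).mp hp))]
      rw [ih _ _ hlen, List.filter_cons_of_neg (by simp [hd])]

lemma pv_getD_rep (n : Nat) : PySem.List.pyGetD (List.replicate 10 (0:Int)) (n:Int) 0 = 0 := by
  rw [PySem.List.pyGetD_natCast]
  rcases Nat.lt_or_ge n 10 with h | h
  · interval_cases n <;> rfl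
  · rw [List.getD_eq_default _ _ (by simpa using h)]

lemma pv_keyB_eq (ds : List Char) :
    PySem.Chars.join [] ((PySem.List.pyRange 0 10 1).map (fun d =>
      List.replicate (PySem.List.pyGetD
        ((List.range 10).map (fun (d' : Nat) => PySem.List.pyGetD (List.replicate 10 (0:Int)) (d' : Int) 0
           + ((ds.count (Char.ofNat (48 + d')) : Nat) : Int)))
        d 0).toNat (Char.ofNat (48 + d.toNat))))
    = pvBlocks ds := by
  have hr : PySem.List.pyRange 0 10 1 = [0,1,2,3,4,5,6,7,8,9] := by decide
  have hrange : List.range 10 = [0,1,2,3,4,5,6,7,8,9] := by decide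
  rw [hr, hrange]
  simp only [List.map_cons, List.map_nil, pv_getD_rep, zero_add]
  norm_num [PySem.List.pyGetD, PySem.List.pyGet?, PySem.List.pyIdx?, PySem.Chars.join,
    List.intercalate, List.intersperse, pvBlocks]
  norm_num [(show (0:Int).toNat = 0 from rfl), (show (1:Int).toNat = 1 from rfl),
    (show (2:Int).toNat = 2 from rfl), (show (3:Int).toNat = 3 from rfl),
    (show (4:Int).toNat = 4 from rfl), (show (5:Int).toNat = 5 from rfl),
    (show (6:Int).toNat = 6 from rfl), (show (7:Int).toNat = 7 from rfl),
    (show (8:Int).toNat = 8 from rfl), (show (9:Int).toNat = 9 from rfl),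
    List.getElem_cons_zero, List.getElem_cons_succ, Int.toNat_natCast,
    (show Char.ofNat 48 = '0' from by decide), (show Char.ofNat 49 = '1' from by decide),
    (show Char.ofNat 50 = '2' from by decide), (show Char.ofNat 51 = '3' from by decide),
    (show Char.ofNat 52 = '4' from by decide), (show Char.ofNat 53 = '5' from by decide),
    (show Char.ofNat 54 = '6' from by decide), (show Char.ofNat 55 = '7' from by decide),
    (show Char.ofNat 56 = '8' from by decide), (show Char.ofNat 57 = '9' from by decide)]

-- facts about pvDigits
lemma pv_digits_all (tok : String) : ∀ c ∈ pvDigits tok, PySem.Chars.isdigit c = true := by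
  intro c hc
  exact (List.mem_filter.mp hc).2

lemma pv_A_cond (tok : String) :
    ((pvDigits tok).length ≠ 5 ∨
      (pvDigits tok).any (fun c => ! PySem.Chars.isIn [c] pvOnesDomain.toList) = true)
    ↔ (pvDigits tok).length ≠ 5 := by
  constructor
  · rintro (h | h)
    · exact h
    · exfalso
      obtain ⟨c, hc, hcI⟩ := List.any_eq_true.mp h
      rw [pv_digit_isIn (pv_digits_all tok c hc)] at hcI
      exact absurd hcI (by simp)
  · exact Or.inl

lemma pv_A_key (tok : String) :
    String.ofList (PySem.Chars.join []
      ((PySem.List.sorted (pvDigits tok) (fun c => c) false).map (fun c => [c])))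
    = pvKey tok := by
  rw [PySem.Chars.join_nil_singletons, pv_sorted_eq_blocks (pv_digits_all tok)]
  rfl

lemma pv_map_strip (s : String) :
    (PySem.Str.split₀ s).map PySem.Str.strip = PySem.Str.split₀ s := by
  exact (List.map_congr_left (fun tok h => pv_str_strip_noop h)).trans (List.map_id' _)

lemma pv_flatMap_singleton {α β : Type} (f : α → β) (l : List α) :
    l.flatMap (fun t => [f t]) = l.map f := by
  induction l with
  | nil => rfl
  | cons x l ih => rw [List.flatMap_cons, List.map_cons, ih]; rfl

lemma pv_filterMap_eq (l : List String) :
    (l.filter (fun t => decide (¬ (pvDigits t).length ≠ 5))).map pvKey = l.filterMap pvF := by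
  induction l with
  | nil => rfl
  | cons t l ih =>
    rw [List.filter_cons, List.filterMap_cons]
    by_cases h : (pvDigits t).length = 5
    · rw [if_pos (by simp [h]), List.map_cons, ih]
      unfold pvF
      rw [if_pos h]
    · rw [if_neg (by simp [h]), ih]
      unfold pvF
      rw [if_neg h]

-- B's fused loop
lemma pv_fused_fold :
    ∀ (toks : List String) (o i : List String),
      toks.foldl (fun (st : List String × List String × PySem.Set String) tok =>
        if (pvDigits tok).length ≠ 5 then (st.1, st.2.1 ++ [tok], st.2.2)
        else if PySem.Set.contains st.2.2 (pvKey tok) then st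
        else (st.1 ++ [pvKey tok], st.2.1, PySem.Set.add st.2.2 (pvKey tok))) (o, i, o)
      = ((toks.filterMap pvF).foldl PySem.Set.add o,
         i ++ toks.filter (fun t => decide ((pvDigits t).length ≠ 5)),
         (toks.filterMap pvF).foldl PySem.Set.add o) := by
  intro toks
  induction toks with
  | nil => intro o i; simp
  | cons t toks ih =>
    intro o i
    rw [List.foldl_cons, List.filterMap_cons, List.filter_cons]
    by_cases h : (pvDigits t).length ≠ 5
    · have hfm : pvF t = none := by unfold pvF; rw [if_neg h]
      have hfilt : (if decide ((pvDigits t).length ≠ 5) = true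
          then t :: List.filter (fun t => decide ((pvDigits t).length ≠ 5)) toks
          else List.filter (fun t => decide ((pvDigits t).length ≠ 5)) toks)
          = t :: List.filter (fun t => decide ((pvDigits t).length ≠ 5)) toks :=
        if_pos (by simp [h])
      rw [hfm, hfilt]
      have hstep : (if (pvDigits t).length ≠ 5 then ((o,i,o).1, (o,i,o).2.1 ++ [t], (o,i,o).2.2)
          else if PySem.Set.contains (o,i,o).2.2 (pvKey t) = true then (o,i,o)
          else ((o,i,o).1 ++ [pvKey t], (o,i,o).2.1, PySem.Set.add (o,i,o).2.2 (pvKey t)))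
          = (o, i ++ [t], o) := if_pos h
      rw [hstep, ih o (i ++ [t])]
      simp
    · have h5 : (pvDigits t).length = 5 := not_not.mp h
      have hfm : pvF t = some (pvKey t) := by unfold pvF; rw [if_pos h5]
      have hfilt : (if decide ((pvDigits t).length ≠ 5) = true
          then t :: List.filter (fun t => decide ((pvDigits t).length ≠ 5)) toks
          else List.filter (fun t => decide ((pvDigits t).length ≠ 5)) toks)
          = List.filter (fun t => decide ((pvDigits t).length ≠ 5)) toks :=
        if_neg (by simp [h5])
      rw [hfm, hfilt, List.foldl_cons]
      by_cases hc : PySem.Set.contains o (pvKey t) = true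
      · have hadd : PySem.Set.add o (pvKey t) = o := if_pos hc
        have hstep : (if (pvDigits t).length ≠ 5 then ((o,i,o).1, (o,i,o).2.1 ++ [t], (o,i,o).2.2)
            else if PySem.Set.contains (o,i,o).2.2 (pvKey t) = true then (o,i,o)
            else ((o,i,o).1 ++ [pvKey t], (o,i,o).2.1, PySem.Set.add (o,i,o).2.2 (pvKey t)))
            = (o, i, o) := by rw [if_neg h]; exact if_pos hc
        rw [hstep, hadd]
        exact ih o i
      · have hadd : PySem.Set.add o (pvKey t) = o ++ [pvKey t] := if_neg hc
        have hstep : (if (pvDigits t).length ≠ 5 then ((o,i,o).1, (o,i,o).2.1 ++ [t], (o,i,o).2.2)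
            else if PySem.Set.contains (o,i,o).2.2 (pvKey t) = true then (o,i,o)
            else ((o,i,o).1 ++ [pvKey t], (o,i,o).2.1, PySem.Set.add (o,i,o).2.2 (pvKey t)))
            = (o ++ [pvKey t], i, PySem.Set.add o (pvKey t)) := by rw [if_neg h]; exact if_neg hc
        rw [hstep, hadd]
        exact ih (o ++ [pvKey t]) i

lemma pv_A_eq (text : String) : normalize_track text = pvCore (pvToks text) := by
  unfold normalize_track
  have hinner : (fun (toks : List String) (line : String) =>
      (PySem.Str.split₀ (PySem.Str.replace line "," " ")).foldl
        (fun toks token => toks ++ [PySem.Str.strip token]) toks)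
      = (fun toks line => toks ++ PySem.Str.split₀ (PySem.Str.replace line "," " ")) := by
    funext toks line
    rw [PySem.List.foldl_append_eq_flatMap (fun token => [PySem.Str.strip token]),
      pv_flatMap_singleton, pv_map_strip]
  rw [hinner, PySem.List.foldl_append_eq_flatMap, List.nil_append]
  have hclass : (fun (p : List String × List String) (tok : String) =>
      let digits : List Char := tok.toList.filter (fun c => PySem.Chars.isdigit c)
      if digits.length ≠ 5 ∨ digits.any (fun c => ! PySem.Chars.isIn [c] pvOnesDomain.toList) then
        (p.1, p.2 ++ [tok])
      else
        (p.1 ++ [String.ofList (PySem.Chars.join []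
            ((PySem.List.sorted digits (fun c => c) false).map (fun c => [c])))], p.2))
      = (fun p tok =>
        if (pvDigits tok).length ≠ 5 then (p.1, p.2 ++ [tok]) else (p.1 ++ [pvKey tok], p.2)) := by
    funext p tok
    dsimp only
    have hd : List.filter (fun c => PySem.Chars.isdigit c) tok.toList = pvDigits tok := rfl
    rw [hd, if_congr (pv_A_cond tok) rfl rfl, pv_A_key tok]
  rw [hclass]
  dsimp only
  rw [pv_classify_fold (P := fun t => (pvDigits t).length ≠ 5) pvKey, List.nil_append, List.nil_append]
  dsimp only
  rw [pv_dedup_fold]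
  unfold pvCore
  rw [pv_filterMap_eq, PySem.Set.ofList_eq_foldl]
  rfl

lemma pv_B_eq (text : String) : normalize_track_alt text = pvCore (pvToks text) := by
  unfold normalize_track_alt
  rw [pv_foldl_nested]
  have hstep : (fun (st : List String × List String × PySem.Set String) (tok : String) =>
        let (out, invalid, seen) := st
        let ct : List Int × Int :=
          tok.toList.foldl (fun (p : List Int × Int) c =>
            if '0' ≤ c ∧ c ≤ '9' then
              (PySem.List.pySetD p.1 ((c.toNat : Int) - 48)
                 (PySem.List.pyGetD p.1 ((c.toNat : Int) - 48) 0 + 1), p.2 + 1)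
            else p) (List.replicate 10 (0 : Int), 0)
        if ct.2 ≠ 5 then (out, invalid ++ [tok], seen)
        else
          let key : String := String.ofList (PySem.Chars.join []
            ((PySem.List.pyRange 0 10 1).map (fun d =>
              List.replicate (PySem.List.pyGetD ct.1 d 0).toNat (Char.ofNat (48 + d.toNat)))))
          if PySem.Set.contains seen key then (out, invalid, seen)
          else (out ++ [key], invalid, PySem.Set.add seen key))
      = (fun st tok =>
        if (pvDigits tok).length ≠ 5 then (st.1, st.2.1 ++ [tok], st.2.2)
        else if PySem.Set.contains st.2.2 (pvKey tok) = true then st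
        else (st.1 ++ [pvKey tok], st.2.1, PySem.Set.add st.2.2 (pvKey tok))) := by
    funext st tok
    obtain ⟨out, invalid, seen⟩ := st
    dsimp only
    rw [pv_count_fold tok.toList (List.replicate 10 0) 0 (by simp)]
    dsimp only
    have hkey : String.ofList (PySem.Chars.join []
        ((PySem.List.pyRange 0 10 1).map (fun d =>
          List.replicate (PySem.List.pyGetD
            ((List.range 10).map (fun (d' : Nat) => PySem.List.pyGetD (List.replicate 10 (0:Int)) (d' : Int) 0
               + (((tok.toList.filter PySem.Chars.isdigit).count (Char.ofNat (48 + d')) : Nat) : Int)))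
            d 0).toNat (Char.ofNat (48 + d.toNat)))))
        = pvKey tok := by
      rw [pv_keyB_eq]
      rfl
    rw [hkey]
    have hcond : ((0 : Int) + ((tok.toList.filter PySem.Chars.isdigit).length : Int) ≠ 5)
        ↔ (pvDigits tok).length ≠ 5 := by
      unfold pvDigits
      omega
    rw [if_congr hcond rfl rfl]
  rw [hstep]
  dsimp only
  rw [pv_fused_fold, List.nil_append]
  unfold pvCore
  rw [PySem.Set.ofList_eq_foldl]
  rfl

-- ===== VERDICT (by name: the statement is the Claim_ definition above) =====
theorem normalize_track_spec : Claim_equal_normalize_track := by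
  intro text _
  unfold Spec_normalize_track
  rw [pv_A_eq, pv_B_eq]
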